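-- pv_equiv track=rewrite | github.com/ajayambaliya/IndiaBixAutomaticApp | src/core/template_manager.py | _categorize_questions
-- ===== SOURCE A (Python) =====
-- from typing import Dict, Any, List, Optional
--
-- def _categorize_questions(questions: List[Dict[str, Any]]) -> Dict[str, List[Dict[str, Any]]]:
--     """Group questions by category"""
--     categorized = {}
--
--     for question in questions:
--         category = question.get('category', 'general')
--         if category not in categorized:
--             categorized[category] = []
--
--         categorized[category].append(question)
--
--     return categorized
-- ===== SOURCE B (Python) =====
-- from typing import Dict, Any, List
--
--
-- def _categorize_questions(questions: List[Dict[str, Any]]) -> Dict[str, List[Dict[str, Any]]]: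
--     """Group questions by category: collect distinct category keys in first-appearance
--     order, then build each group with one forward filtering scan per key."""
--     keys = []
--     for question in questions:
--         key = question.get('category', 'general')
--         if key not in keys:
--             keys.append(key)
--     return {key: [q for q in questions if q.get('category', 'general') == key]
--             for key in keys}
-- ===== Notes on version B (the rewrite author's own statement) =====
-- stated objective: alternative
-- what changed: Replaces the single online grouping pass (create-bucket-if-absent and append per question) by a two-phase scheme: one pass extracting the distinct category keys in first-appearance order, then one filtering scan of the question list per distinct key.
import Mathlib
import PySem

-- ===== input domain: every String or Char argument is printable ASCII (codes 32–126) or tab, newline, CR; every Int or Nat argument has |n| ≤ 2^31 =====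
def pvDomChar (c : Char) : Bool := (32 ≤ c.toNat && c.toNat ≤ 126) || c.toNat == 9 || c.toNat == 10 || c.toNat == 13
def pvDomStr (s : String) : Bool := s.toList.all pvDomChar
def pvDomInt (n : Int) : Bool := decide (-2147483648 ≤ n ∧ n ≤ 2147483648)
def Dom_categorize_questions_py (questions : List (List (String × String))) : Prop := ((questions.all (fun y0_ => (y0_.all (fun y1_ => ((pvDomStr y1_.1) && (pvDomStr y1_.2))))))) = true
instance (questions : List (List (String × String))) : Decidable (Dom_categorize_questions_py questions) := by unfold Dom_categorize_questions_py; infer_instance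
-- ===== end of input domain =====

-- B groups by first collecting the distinct category keys, then filtering once per key
-- (alternative decomposition, not faster); A's single grouping pass is preserved exactly.

-- ===== PORT A =====
-- question.get('category', 'general') on the assoc-list dict (shared lookup primitive of both ports)
def pvCat (q : List (String × String)) : String :=
  (PySem.Dict.mk q).getD "category" "general"

def categorize_questions_py (questions : List (List (String × String))) : List (String × List (List (String × String))) :=
  (questions.foldl
    (fun categorized question =>
      let category := pvCat question
      let categorized :=
        if categorized.contains category then categorized
        else categorized.insert category []
      categorized.modify category [] (fun l => l ++ [question]))
    PySem.Dict.empty).items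

-- ===== PORT B =====
def categorize_questions_py_alt (questions : List (List (String × String))) : List (String × List (List (String × String))) :=
  let keys := questions.foldl
    (fun ks question =>
      let key := pvCat question
      if ks.contains key then ks else ks ++ [key]) []
  keys.map (fun key => (key, questions.filter (fun q => pvCat q == key)))

-- ===== PRECONDITION & SPEC =====
def Spec_categorize_questions_py (questions : List (List (String × String))) (out : List (String × List (List (String × String)))) : Prop := out = categorize_questions_py_alt questions
instance (questions : List (List (String × String))) (out : List (String × List (List (String × String)))) : Decidable (Spec_categorize_questions_py questions out) := by unfold Spec_categorize_questions_py; infer_instance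

-- ===== CLAIM (what is proved, stated in full; the proofs are below) =====
def Claim_equal_categorize_questions_py : Prop := ∀ (questions : List (List (String × String))), Dom_categorize_questions_py questions → Spec_categorize_questions_py questions (categorize_questions_py questions)

-- ===== LEMMAS AND PROOFS =====

-- A's "insert empty bucket if absent, then append" step is one modify with default []
theorem stepA_eq (d : PySem.Dict String (List (List (String × String))))
    (q : List (String × String)) :
    (if d.contains (pvCat q) then d else d.insert (pvCat q) []).modify (pvCat q) []
        (fun l => l ++ [q])
      = d.modify (pvCat q) [] (fun l => l ++ [q]) := by
  by_cases h : d.contains (pvCat q) = true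
  · simp [h]
  · simp only [Bool.not_eq_true] at h
    simp [h, PySem.Dict.modify, PySem.Dict.getD_insert_self,
      PySem.Dict.insert_insert_self, PySem.Dict.getD_of_not_contains d _ h]

theorem foldA_eq (questions : List (List (String × String))) :
    questions.foldl
      (fun categorized question =>
        let category := pvCat question
        let categorized :=
          if categorized.contains category then categorized
          else categorized.insert category []
        categorized.modify category [] (fun l => l ++ [question]))
      PySem.Dict.empty
    = questions.foldl
        (fun d q => d.modify (pvCat q) [] (fun l => l ++ [q])) PySem.Dict.empty := by
  refine congrFun (congrFun (congrArg _ (funext fun d => funext fun q => ?_)) _) _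
  exact stepA_eq d q

-- getD of the grouping fold is the forward filter of the whole list
theorem getD_foldA (questions : List (List (String × String))) (c : String) :
    (questions.foldl
        (fun d q => d.modify (pvCat q) [] (fun l => l ++ [q])) PySem.Dict.empty).getD c []
      = questions.filter (fun q => pvCat q == c) := by
  have h := PySem.Dict.getD_foldl_modify_append
    (questions.map (fun q => (pvCat q, q)))
    (PySem.Dict.empty : PySem.Dict String (List (List (String × String)))) c
  rw [List.foldl_map] at h
  simpa [List.filter_map, List.map_map, Function.comp_def] using h

-- ===== VERDICT (by name: the statement is the Claim_ definition above) =====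
theorem categorize_questions_py_spec : Claim_equal_categorize_questions_py := by
  intro questions _
  unfold Spec_categorize_questions_py categorize_questions_py categorize_questions_py_alt
  rw [foldA_eq]
  have hkeys :
      (questions.foldl
        (fun d q => d.modify (pvCat q) [] (fun l => l ++ [q])) PySem.Dict.empty).keys
      = questions.foldl
          (fun ks question =>
            let key := pvCat question
            if ks.contains key then ks else ks ++ [key]) [] := by
    rw [PySem.Dict.keys_foldl_modify_key questions pvCat []
        (fun _ q l => l ++ [q]) PySem.Dict.empty]
    simp only [PySem.Dict.keys_empty, PySem.Set.update, List.foldl_map]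
    rfl
  have hnd :
      (questions.foldl
        (fun d q => d.modify (pvCat q) [] (fun l => l ++ [q])) PySem.Dict.empty).keys.Nodup :=
    PySem.Dict.nodup_keys_foldl_modify_key questions pvCat []
      (fun _ q l => l ++ [q]) PySem.Dict.empty (by simp)
  rw [PySem.Dict.items_eq_map_keys _ hnd [], hkeys]
  exact List.map_congr_left fun k _ => by rw [getD_foldA]
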